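-- pv_equiv track=rewrite | github.com/TaeHyoungKwon/Codewars | kata_2022/codewars/7kyu/previous_multiple_of_threee.py | prev_mult_of_three
-- ===== SOURCE A (Python) =====
-- from typing import Optional
--
-- def prev_mult_of_three(n: int) -> Optional[int]:
--     n: list[int] = list(map(int, str(n)))
--     for _ in range(len(n)):
--         combined = int("".join(str(ele) for ele in n))
--         if combined % 3 == 0:
--             return combined
--         n.pop()
--
--     return None
-- ===== SOURCE B (Python) =====
-- def prev_mult_of_three(n):
--     digits = [int(c) for c in str(n)]
--     s = 0
--     best = None
--     for i, d in enumerate(digits):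
--         s += d
--         if s % 3 == 0:
--             best = i + 1
--     if best is None:
--         return None
--     v = 0
--     for d in digits[:best]:
--         v = 10 * v + d
--     return v
-- ===== Notes on version B (the rewrite author's own statement) =====
-- stated objective: alternative
-- what changed: B uses the digit-sum divisibility rule for three: one forward pass over the digits keeps a running sum and the length of the last prefix whose sum is divisible by three, then reconstructs that one prefix as an integer; A instead re-joins, re-parses and re-mods the full prefix number on every iteration, popping digits from the right.
import Mathlib
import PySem

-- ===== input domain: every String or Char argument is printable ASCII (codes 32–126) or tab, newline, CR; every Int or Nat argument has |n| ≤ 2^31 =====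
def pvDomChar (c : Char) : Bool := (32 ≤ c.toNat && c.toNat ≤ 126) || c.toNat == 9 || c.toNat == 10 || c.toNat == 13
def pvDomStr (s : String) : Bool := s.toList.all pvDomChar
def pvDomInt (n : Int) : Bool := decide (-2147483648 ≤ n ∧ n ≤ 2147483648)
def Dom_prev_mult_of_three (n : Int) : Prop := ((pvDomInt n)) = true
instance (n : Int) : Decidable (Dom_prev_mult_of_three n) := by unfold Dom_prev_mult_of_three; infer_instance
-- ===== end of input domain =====

-- B replaces A's per-prefix join/int()/% re-computation by one forward pass that keeps a
-- running digit sum (divisibility-by-3 rule) and the last qualifying prefix length;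
-- return values are proved equal for n ≥ 0 (both raise ValueError on n < 0).

-- ===== PORT A =====
-- int() applied to a ONE-CHARACTER string (both sources do int over characters of str(n)):
-- hand port, exact on every ASCII character — the digit's value, ValueError (none) otherwise.
def pvCharInt? (c : Char) : Option Int :=
  if c.isDigit then some ((c.toNat : Int) - 48) else none

-- list(map(int, chars)) / [int(c) for c in str(n)]: raises (none) at the first non-digit char
def pvMapInt? : List Char → Option (List Int)
  | [] => some []
  | c :: cs =>
    match pvCharInt? c, pvMapInt? cs with
    | some v, some vs => some (v :: vs)
    | _, _ => none

def pvDigitsVal (cs : List Char) : Int :=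
  cs.foldl (fun a c => 10 * a + ((c.toNat : Int) - 48)) 0

-- int() applied to "".join(str(ele) for ele in n): hand port of int(s), exact on every string
-- made of an optional leading '-' followed by characters none of which is whitespace, '_' or '+'
-- — the only shapes a concatenation of str(int) pieces can take.
def pvIntJoin? (cs : List Char) : Option Int :=
  if cs.head? = some '-' then
    if cs.tail ≠ [] ∧ cs.tail.all Char.isDigit then some (-(pvDigitsVal cs.tail)) else none
  else if cs ≠ [] ∧ cs.all Char.isDigit then some (pvDigitsVal cs) else none

-- "".join(str(ele) for ele in ds)
def pvJoinStrs (ds : List Int) : List Char :=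
  PySem.Chars.join [] (ds.map PySem.Int.toChars)

-- for _ in range(len(n)): … n.pop()   (fuel = the initial length, fixed by range())
def pvLoopA : List Int → Nat → Option Int
  | _, 0 => none
  | ds, f + 1 =>
    let combined := (pvIntJoin? (pvJoinStrs ds)).getD 0
    if PySem.Int.mod combined 3 = 0 then some combined
    else pvLoopA ds.dropLast f

def prev_mult_of_three (n : Int) : Option Int :=
  match pvMapInt? (PySem.Int.toChars n) with
  | none => none          -- ValueError (n < 0): outside Pre_
  | some ds => pvLoopA ds ds.length

-- ===== PORT B =====
-- loop body: s += d; if s % 3 == 0: best = i + 1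
def pvStepB (st : Int × Option Int) (p : Int × Int) : Int × Option Int :=
  let s := st.1 + p.2
  (s, if PySem.Int.mod s 3 = 0 then some (p.1 + 1) else st.2)

def prev_mult_of_three_alt (n : Int) : Option Int :=
  match pvMapInt? (PySem.Int.toChars n) with
  | none => none          -- ValueError (n < 0): outside Pre_
  | some ds =>
    match ((PySem.List.enumerate ds).foldl pvStepB (0, none)).2 with
    | none => none
    | some best =>
      some ((PySem.List.slice ds none (some best)).foldl (fun v d => 10 * v + d) 0)

-- ===== PRECONDITION & SPEC =====
-- Pre_ excludes negative n, on which A (and B) raise ValueError (int('-') over str(n)).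
def Pre_prev_mult_of_three (n : Int) : Prop := 0 ≤ n
instance (n : Int) : Decidable (Pre_prev_mult_of_three n) := by
  unfold Pre_prev_mult_of_three; infer_instance

def pvWitness_prev_mult_of_three : Int := 2022

def Spec_prev_mult_of_three (n : Int) (out : Option Int) : Prop := out = prev_mult_of_three_alt n
instance (n : Int) (out : Option Int) : Decidable (Spec_prev_mult_of_three n out) := by
  unfold Spec_prev_mult_of_three; infer_instance

-- ===== CLAIM (what is proved, stated in full; the proofs are below) =====
def Claim_equal_prev_mult_of_three : Prop := ∀ (n : Int), Dom_prev_mult_of_three n → Pre_prev_mult_of_three n → Spec_prev_mult_of_three n (prev_mult_of_three n)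

-- ===== LEMMAS AND PROOFS =====

def pvVal (l : List Int) : Int := l.foldl (fun v d => 10 * v + d) 0

-- the decimal digits of m, big-endian, as naturals
def pvNatDigits (m : Nat) : List Nat :=
  if m < 10 then [m] else pvNatDigits (m / 10) ++ [m % 10]
termination_by m
decreasing_by exact Nat.div_lt_self (by omega) (by norm_num)

theorem pvNatDigits_small {m : Nat} (h : m < 10) : pvNatDigits m = [m] := by
  rw [pvNatDigits]; simp [h]

theorem pvNatDigits_big {m : Nat} (h : 10 ≤ m) :
    pvNatDigits m = pvNatDigits (m / 10) ++ [m % 10] := by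
  rw [pvNatDigits]; simp [Nat.not_lt.mpr h]

theorem pvNatDigits_lt (m : Nat) : ∀ d ∈ pvNatDigits m, d < 10 := by
  induction m using Nat.strong_induction_on with
  | _ m ih =>
    by_cases h : m < 10
    · simp [pvNatDigits_small h, h]
    · rw [pvNatDigits_big (Nat.not_lt.mp h)]
      intro d hd
      rcases List.mem_append.mp hd with hd | hd
      · exact ih (m / 10) (Nat.div_lt_self (by omega) (by norm_num)) d hd
      · simp at hd; omega

theorem pvToDigitsCore_eq (f : Nat) : ∀ (m : Nat) (l : List Char), m < f →
    Nat.toDigitsCore 10 f m l = (pvNatDigits m).map Nat.digitChar ++ l := by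
  induction f with
  | zero => intro m l h; omega
  | succ f ih =>
    intro m l h
    by_cases hm : m < 10
    · have hd : m / 10 = 0 := Nat.div_eq_of_lt hm
      simp [Nat.toDigitsCore, hd, pvNatDigits_small hm, Nat.mod_eq_of_lt hm]
    · have hm' : 10 ≤ m := Nat.not_lt.mp hm
      have hd : m / 10 ≠ 0 := by
        have h1 : 1 ≤ m / 10 := (Nat.one_le_div_iff (by norm_num)).mpr hm'
        omega
      have hlt : m / 10 < f := by
        have := Nat.div_lt_self (show 0 < m by omega) (show 1 < 10 by norm_num); omega
      simp only [Nat.toDigitsCore, hd, if_false]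
      rw [ih (m / 10) _ hlt, pvNatDigits_big hm']
      simp

theorem pvToDigits_eq (m : Nat) : Nat.toDigits 10 m = (pvNatDigits m).map Nat.digitChar := by
  have := pvToDigitsCore_eq (m + 1) m [] (by omega)
  simpa [Nat.toDigits] using this

theorem pvDigitChar_val {d : Nat} (h : d < 10) :
    ((Nat.digitChar d).toNat : Int) - 48 = (d : Int) := by
  interval_cases d <;> decide

theorem pvDigitChar_isDigit {d : Nat} (h : d < 10) : (Nat.digitChar d).isDigit = true := by
  interval_cases d <;> decide

theorem pvDigitChar_ne_dash {d : Nat} (h : d < 10) : Nat.digitChar d ≠ '-' := by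
  interval_cases d <;> decide

theorem pvCharInt?_digitChar {d : Nat} (h : d < 10) :
    pvCharInt? (Nat.digitChar d) = some (Int.ofNat d) := by
  interval_cases d <;> decide

theorem pvToChars_digit {d : Nat} (h : d < 10) :
    PySem.Int.toChars (Int.ofNat d) = [Nat.digitChar d] := by
  interval_cases d <;> decide

theorem pvMapInt?_digits (l : List Nat) (h : ∀ d ∈ l, d < 10) :
    pvMapInt? (l.map Nat.digitChar) = some (l.map Int.ofNat) := by
  induction l with
  | nil => rfl
  | cons d l ih =>
    have hd : d < 10 := h d (by simp)
    simp only [List.map_cons, pvMapInt?, pvCharInt?_digitChar hd,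
      ih (fun x hx => h x (by simp [hx]))]

theorem pvJoinStrs_digits (l : List Nat) (h : ∀ d ∈ l, d < 10) :
    pvJoinStrs (l.map Int.ofNat) = l.map Nat.digitChar := by
  unfold pvJoinStrs
  have h1 : (l.map Int.ofNat).map PySem.Int.toChars
      = (l.map Nat.digitChar).map (fun c => [c]) := by
    simp only [List.map_map]
    apply List.map_congr_left
    intro d hd
    simpa using pvToChars_digit (h d hd)
  rw [h1, PySem.Chars.join_nil_singletons]

theorem pvDigitsVal_eq_pvVal (l : List Nat) (h : ∀ d ∈ l, d < 10) :
    pvDigitsVal (l.map Nat.digitChar) = pvVal (l.map Int.ofNat) := by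
  unfold pvDigitsVal pvVal
  suffices hgen : ∀ (a : Int),
      (l.map Nat.digitChar).foldl (fun acc c => 10 * acc + ((c.toNat : Int) - 48)) a
        = (l.map Int.ofNat).foldl (fun v d => 10 * v + d) a by
    exact hgen 0
  induction l with
  | nil => intro a; rfl
  | cons d l ih =>
    intro a
    have hd : d < 10 := h d (by simp)
    simp only [List.map_cons, List.foldl_cons, pvDigitChar_val hd]
    exact ih (fun x hx => h x (by simp [hx])) _

theorem pvIntJoin?_digits (l : List Nat) (hne : l ≠ []) (h : ∀ d ∈ l, d < 10) :
    pvIntJoin? (l.map Nat.digitChar) = some (pvDigitsVal (l.map Nat.digitChar)) := by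
  cases l with
  | nil => exact absurd rfl hne
  | cons d l =>
    have hd : d < 10 := h d (by simp)
    unfold pvIntJoin?
    rw [if_neg (by simp [pvDigitChar_ne_dash hd])]
    rw [if_pos]
    refine ⟨by simp, ?_⟩
    simp only [List.map_cons, List.all_cons, Bool.and_eq_true]
    refine ⟨pvDigitChar_isDigit hd, ?_⟩
    rw [List.all_eq_true]
    intro c hc
    rcases List.mem_map.mp hc with ⟨x, hx, rfl⟩
    exact pvDigitChar_isDigit (h x (by simp [hx]))

-- A's 'combined' on the digit list l is the plain base-10 value of l
theorem pvCombined_eq (l : List Nat) (hne : l ≠ []) (h : ∀ d ∈ l, d < 10) :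
    (pvIntJoin? (pvJoinStrs (l.map Int.ofNat))).getD 0 = pvVal (l.map Int.ofNat) := by
  rw [pvJoinStrs_digits _ h, pvIntJoin?_digits _ hne h, pvDigitsVal_eq_pvVal _ h]
  rfl

theorem pvVal_append (l : List Int) (d : Int) : pvVal (l ++ [d]) = 10 * pvVal l + d := by
  simp [pvVal]

-- digit-sum rule modulo 3
theorem pvVal_mod_three (l : List Int) : PySem.Int.mod (pvVal l) 3 = PySem.Int.mod l.sum 3 := by
  induction l using List.reverseRecOn with
  | nil => rfl
  | append_singleton l d ih =>
    rw [pvVal_append, PySem.Int.mod_eq_emod_of_pos ?hp, PySem.Int.mod_eq_emod_of_pos ?hp]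
    case hp => norm_num
    rw [PySem.Int.mod_eq_emod_of_pos (by norm_num), PySem.Int.mod_eq_emod_of_pos (by norm_num)] at ih
    simp only [List.sum_append, List.sum_cons, List.sum_nil]
    omega

-- the first component of B's scan is the digit sum
theorem pvScan_fst (l : List Int) : ∀ (s : Nat) (a : Int) (b : Option Int),
    ((PySem.List.enumerate l (s : Int)).foldl pvStepB (a, b)).1 = a + l.sum := by
  induction l with
  | nil => intro s a b; simp [PySem.List.enumerate_nil]
  | cons d l ih =>
    intro s a b
    rw [PySem.List.enumerate_cons]
    simp only [List.foldl_cons]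
    have := ih (s + 1) (a + d) (if PySem.Int.mod (a + d) 3 = 0 then some ((s : Int) + 1) else b)
    simp only [pvStepB] at this ⊢
    push_cast at this ⊢
    rw [this]
    simp [List.sum_cons]; ring

-- any index recorded by B's scan is at most start + length
theorem pvScan_snd_le (l : List Int) : ∀ (s : Nat) (a : Int) (b : Option Int),
    (∀ k, b = some k → k ≤ (s : Int)) →
    ∀ k, ((PySem.List.enumerate l (s : Int)).foldl pvStepB (a, b)).2 = some k →
      k ≤ (s : Int) + l.length := by
  induction l with
  | nil =>
    intro s a b hb k hk
    simp [PySem.List.enumerate_nil] at hk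
    have := hb k hk; simp; omega
  | cons d l ih =>
    intro s a b hb k hk
    rw [PySem.List.enumerate_cons] at hk
    simp only [List.foldl_cons] at hk
    have hb' : ∀ k, (if PySem.Int.mod (a + d) 3 = 0 then some ((s : Int) + 1) else b)
        = some k → k ≤ ((s + 1 : Nat) : Int) := by
      intro k hk'
      split at hk'
      · injection hk' with h; push_cast; omega
      · have := hb k hk'; push_cast; omega
    have := ih (s + 1) (a + d) _ hb' k (by
      simpa [pvStepB] using hk)
    simp only [List.length_cons]
    push_cast at this ⊢
    omega

-- B's result read off the final state, as a function of the digit list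
def pvBRes (ds : List Int) : Option Int :=
  match ((PySem.List.enumerate ds).foldl pvStepB (0, none)).2 with
  | none => none
  | some best =>
    some ((PySem.List.slice ds none (some best)).foldl (fun v d => 10 * v + d) 0)

-- core equivalence on any nonempty list of decimal digits
theorem pvLoop_eq (dl : List Nat) (h : ∀ d ∈ dl, d < 10) :
    pvLoopA (dl.map Int.ofNat) (dl.map Int.ofNat).length = pvBRes (dl.map Int.ofNat) := by
  induction dl using List.reverseRecOn with
  | nil => rfl
  | append_singleton dl e ih =>
    have hdl : ∀ d ∈ dl, d < 10 := fun d hd => h d (by simp [hd])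
    have he : e < 10 := h e (by simp)
    have hmap : (dl ++ [e]).map Int.ofNat = dl.map Int.ofNat ++ [Int.ofNat e] := by simp
    -- A side: one unfolding
    have hlen : ((dl ++ [e]).map Int.ofNat).length = (dl.map Int.ofNat).length + 1 := by simp
    rw [hlen, hmap]
    show pvLoopA (dl.map Int.ofNat ++ [Int.ofNat e]) ((dl.map Int.ofNat).length + 1) = _
    rw [pvLoopA]
    have hcomb := pvCombined_eq (dl ++ [e]) (by simp) h
    rw [hmap] at hcomb
    rw [hcomb]
    have hdropA : (dl.map Int.ofNat ++ [Int.ofNat e]).dropLast = dl.map Int.ofNat := by simp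
    rw [hdropA]
    -- B side: split the fold at the last element
    have henum : PySem.List.enumerate (dl.map Int.ofNat ++ [Int.ofNat e]) 0
        = PySem.List.enumerate (dl.map Int.ofNat) 0
          ++ [(((dl.map Int.ofNat).length : Int), Int.ofNat e)] := by
      rw [PySem.List.enumerate_append]; norm_num
    have hfst : ((PySem.List.enumerate (dl.map Int.ofNat) (0 : Int)).foldl pvStepB (0, none)).1
        = (dl.map Int.ofNat).sum := by
      have := pvScan_fst (dl.map Int.ofNat) 0 0 none
      simpa using this
    unfold pvBRes
    rw [henum, List.foldl_append]
    simp only [List.foldl_cons, List.foldl_nil]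
    set st := (PySem.List.enumerate (dl.map Int.ofNat) (0 : Int)).foldl pvStepB (0, none) with hst
    -- the two branch conditions coincide (digit-sum rule)
    have hsum : st.1 + Int.ofNat e = (dl.map Int.ofNat ++ [Int.ofNat e]).sum := by
      rw [hfst]; simp
    have hcond : PySem.Int.mod (pvVal (dl.map Int.ofNat ++ [Int.ofNat e])) 3
        = PySem.Int.mod (st.1 + Int.ofNat e) 3 := by
      rw [hsum]; exact pvVal_mod_three _
    by_cases h3 : PySem.Int.mod (pvVal (dl.map Int.ofNat ++ [Int.ofNat e])) 3 = 0
    · -- both take the full list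
      rw [if_pos h3]
      simp only [pvStepB, ← hcond, h3, if_pos]
      have hbest : ((dl.map Int.ofNat).length : Int) + 1
          = (((dl.map Int.ofNat).length + 1 : Nat) : Int) := by push_cast; ring
      rw [hbest, PySem.List.slice_to_natCast]
      rw [List.take_of_length_le (by simp)]
      rfl
    · rw [if_neg h3]
      simp only [pvStepB, ← hcond, h3, if_false]
      rw [ih hdl]
      unfold pvBRes
      cases hb : ((PySem.List.enumerate (dl.map Int.ofNat) (0 : Int)).foldl pvStepB (0, none)).2 with
      | none => simp
      | some k =>
        have hk0 : 0 ≤ k ∧ k ≤ ((dl.map Int.ofNat).length : Int) := by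
          have hle := pvScan_snd_le (dl.map Int.ofNat) 0 0 none (by intro k hk; cases hk) k
            (by simpa using hb)
          have hmono : ∀ (l : List Int) (s : Nat) (a : Int) (b : Option Int) (k : Int),
              (∀ j, b = some j → 1 ≤ j) →
              ((PySem.List.enumerate l (s : Int)).foldl pvStepB (a, b)).2 = some k → 1 ≤ k := by
            intro l
            induction l with
            | nil => intro s a b k hb hk; simp [PySem.List.enumerate_nil] at hk; exact hb k hk
            | cons d l ihm =>
              intro s a b k hb hk
              rw [PySem.List.enumerate_cons] at hk
              simp only [List.foldl_cons] at hk
              refine ihm (s + 1) (a + d) _ k ?_ (by simpa [pvStepB] using hk)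
              intro j hj
              split at hj
              · injection hj with hj'; omega
              · exact hb j hj
          have h1 : 1 ≤ k := hmono (dl.map Int.ofNat) 0 0 none k (by intro j hj; cases hj)
            (by simpa using hb)
          constructor
          · omega
          · simpa using hle
        have htake : PySem.List.slice (dl.map Int.ofNat ++ [Int.ofNat e]) none (some k)
            = PySem.List.slice (dl.map Int.ofNat) none (some k) := by
          rw [PySem.List.slice_to _ hk0.1, PySem.List.slice_to _ hk0.1]
          rw [List.take_append_of_le_length (by
            have := hk0.2
            omega)]
        simp only [htake]

-- ===== VERDICT (by name: the statement is the Claim_ definition above) =====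
theorem prev_mult_of_three_spec : Claim_equal_prev_mult_of_three := by
  intro n _ hpre
  unfold Pre_prev_mult_of_three at hpre
  unfold Spec_prev_mult_of_three
  obtain ⟨m, rfl⟩ : ∃ m : Nat, n = (m : Int) := ⟨n.toNat, by omega⟩
  unfold prev_mult_of_three prev_mult_of_three_alt
  have htc : PySem.Int.toChars ((m : Nat) : Int) = (pvNatDigits m).map Nat.digitChar := by
    unfold PySem.Int.toChars
    rw [if_neg (by omega)]
    simpa using pvToDigits_eq m
  rw [htc, pvMapInt?_digits _ (pvNatDigits_lt m)]
  exact pvLoop_eq (pvNatDigits m) (pvNatDigits_lt m)
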